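-- pv_equiv track=rewrite | github.com/BrianLi009/PhysicsCheck_log | candidates/read.py | max_degree
-- ===== SOURCE A (Python) =====
-- def max_degree(M, n):
--     max_rowsum = 0
--     for i in range(n):
--         rowsum = 0
--         for j in range(n):
--             if i > j:
--                 rowsum += M[j][i]
--             else:
--                 rowsum += M[i][j]
--         if rowsum > max_rowsum:
--             max_rowsum = rowsum
--     return max_rowsum
-- ===== SOURCE B (Python) =====
-- def max_degree(M, n):
--     # Accumulate each upper-triangle entry into both endpoint totals in one pass,
--     # instead of recomputing every full symmetric row sum with an i>j branch.
--     degrees = [0] * n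
--     for i in range(n):
--         degrees[i] += M[i][i]
--         for j in range(i + 1, n):
--             v = M[i][j]
--             degrees[i] += v
--             degrees[j] += v
--     best = 0
--     for d in degrees:
--         best = max(best, d)
--     return best
-- ===== Notes on version B (the rewrite author's own statement) =====
-- stated objective: alternative
-- what changed: Instead of recomputing each full symmetric row sum with an i>j branch over all n^2 pairs, B reads each upper-triangle entry M[i][j] once and adds it to both endpoint totals (degrees[i] and degrees[j]), then takes the running max of the totals floored at 0.
import Mathlib
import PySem

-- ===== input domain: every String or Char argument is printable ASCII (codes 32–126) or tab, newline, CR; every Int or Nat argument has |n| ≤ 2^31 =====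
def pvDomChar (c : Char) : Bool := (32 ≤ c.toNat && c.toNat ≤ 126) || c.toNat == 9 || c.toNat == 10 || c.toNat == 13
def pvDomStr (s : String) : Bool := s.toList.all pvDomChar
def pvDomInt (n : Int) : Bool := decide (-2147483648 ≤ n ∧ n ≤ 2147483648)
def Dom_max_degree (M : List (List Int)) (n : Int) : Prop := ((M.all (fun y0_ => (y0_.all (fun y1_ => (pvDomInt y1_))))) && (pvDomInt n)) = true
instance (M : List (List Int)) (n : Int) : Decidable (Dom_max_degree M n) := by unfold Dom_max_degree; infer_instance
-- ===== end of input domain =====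

-- B accumulates each upper-triangle entry into both endpoint row totals in one pass
-- (half the matrix reads), instead of recomputing every full symmetric row sum with an i>j branch.


-- ===== PORT A =====
def max_degree (M : List (List Int)) (n : Int) : Int :=
  (PySem.List.pyRange 0 n 1).foldl (fun max_rowsum i =>
    let rowsum := (PySem.List.pyRange 0 n 1).foldl (fun rowsum j =>
      if i > j then rowsum + PySem.List.pyGetD (PySem.List.pyGetD M j []) i 0
      else rowsum + PySem.List.pyGetD (PySem.List.pyGetD M i []) j 0) 0
    if rowsum > max_rowsum then rowsum else max_rowsum) 0

-- ===== PORT B =====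
def max_degree_alt (M : List (List Int)) (n : Int) : Int :=
  let degrees : List Int := List.replicate n.toNat 0
  let degrees := (PySem.List.pyRange 0 n 1).foldl (fun d i =>
    let d := PySem.List.pySetD d i (PySem.List.pyGetD d i 0 + PySem.List.pyGetD (PySem.List.pyGetD M i []) i 0)
    (PySem.List.pyRange (i + 1) n 1).foldl (fun d j =>
      let v := PySem.List.pyGetD (PySem.List.pyGetD M i []) j 0
      let d := PySem.List.pySetD d i (PySem.List.pyGetD d i 0 + v)
      PySem.List.pySetD d j (PySem.List.pyGetD d j 0 + v)) d) degrees
  degrees.foldl (fun best d => max best d) 0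

-- ===== PRECONDITION & SPEC =====
-- Pre_: exactly the inputs where A raises no IndexError — the first n rows exist and each has ≥ n entries
-- (for n ≤ 0 the loop body never runs, so no constraint).
def Pre_max_degree (M : List (List Int)) (n : Int) : Prop :=
  n ≤ (M.length : Int) ∧ ∀ r ∈ M.take n.toNat, n ≤ (r.length : Int)
instance (M : List (List Int)) (n : Int) : Decidable (Pre_max_degree M n) := by unfold Pre_max_degree; infer_instance
def pvWitness_max_degree : List (List Int) × Int := ([[1, 2], [2, -3]], 2)
def Spec_max_degree (M : List (List Int)) (n : Int) (out : Int) : Prop := out = max_degree_alt M n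
instance (M : List (List Int)) (n : Int) (out : Int) : Decidable (Spec_max_degree M n out) := by unfold Spec_max_degree; infer_instance

-- ===== CLAIM (what is proved, stated in full; the proofs are below) =====
def Claim_equal_max_degree : Prop := ∀ (M : List (List Int)) (n : Int), Dom_max_degree M n → Pre_max_degree M n → Spec_max_degree M n (max_degree M n)

-- ===== LEMMAS AND PROOFS =====

-- matrix entry with the defaults both ports' total primitives use (in range under Pre_)
def ent (M : List (List Int)) (a b : Nat) : Int := (M.getD a []).getD b 0

-- the symmetric row total ("degree") of row k in the n-by-n reading of M
def deg (M : List (List Int)) (N k : Nat) : Int :=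
  (∑ j ∈ Finset.range k, ent M j k) + ∑ j ∈ Finset.Ico k N, ent M k j

theorem sum_split (M : List (List Int)) (N k : Nat) (hk : k ≤ N) :
    ∑ j ∈ Finset.range N, (if j < k then ent M j k else ent M k j) = deg M N k := by
  rw [Finset.range_eq_Ico, ← Finset.sum_Ico_consecutive _ (Nat.zero_le k) hk]
  unfold deg
  congr 1
  · rw [← Finset.range_eq_Ico]
    exact Finset.sum_congr rfl (fun j hj => if_pos (Finset.mem_range.mp hj))
  · exact Finset.sum_congr rfl (fun j hj => if_neg (by simp at hj; omega))

theorem row_eq (M : List (List Int)) (N k : Nat) (hk : k ≤ N) :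
    List.foldl (fun (x : Int) (y : Nat) =>
      if (k : Int) > (y : Int) then x + PySem.List.pyGetD (PySem.List.pyGetD M (y : Int) []) (k : Int) 0
      else x + PySem.List.pyGetD (PySem.List.pyGetD M (k : Int) []) (y : Int) 0) 0 (List.range N)
    = deg M N k := by
  rw [PySem.List.foldl_congr_mem _ _
    (fun s (j : Nat) => s + (if j < k then ent M j k else ent M k j)) 0 ?_]
  · rw [PySem.List.foldl_add]
    show 0 + ∑ j ∈ Finset.range N, (if j < k then ent M j k else ent M k j) = deg M N k
    rw [sum_split M N k hk]; ring
  · intro s j _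
    by_cases h : j < k
    · rw [if_pos (by exact_mod_cast h)]; simp [ent, h]
    · rw [if_neg (by exact_mod_cast h)]; simp [ent, h]

theorem a_eq (M : List (List Int)) (n : Int) :
    max_degree M n = (List.range n.toNat).foldl (fun mx i => max mx (deg M n.toNat i)) 0 := by
  unfold max_degree
  rw [PySem.List.pyRange_one 0 n]
  simp only [sub_zero, List.foldl_map, zero_add]
  apply PySem.List.foldl_congr_mem
  intro mx k hk
  simp only [List.mem_range] at hk
  rw [row_eq M n.toNat k (le_of_lt hk)]
  by_cases h : deg M n.toNat k ≤ mx
  · rw [if_neg (by omega), max_eq_left h]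
  · rw [if_pos (by omega), max_eq_right (by omega)]

def innerStep (M : List (List Int)) (i : Nat) (d : List Int) (j : Nat) : List Int :=
  let v := ent M i j
  let d := d.set i (d.getD i 0 + v)
  d.set j (d.getD j 0 + v)

def rowStep (M : List (List Int)) (N : Nat) (d : List Int) (i : Nat) : List Int :=
  (List.range' (i + 1) (N - (i + 1))).foldl (innerStep M i) (d.set i (d.getD i 0 + ent M i i))

def contrib (M : List (List Int)) (N i k : Nat) : Int :=
  if k = i then ent M i i + ∑ j ∈ Finset.Ico (i + 1) N, ent M i j
  else if i < k ∧ k < N then ent M i k else 0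

theorem getD_set (d : List Int) (a k : Nat) (v : Int) :
    (d.set a v).getD k 0 = if a = k ∧ a < d.length then v else d.getD k 0 := by
  simp only [List.getD_eq_getElem?_getD, List.getElem?_set]
  by_cases h1 : a = k
  · subst h1
    by_cases h2 : a < d.length
    · rw [if_pos rfl, if_pos h2, if_pos ⟨rfl, h2⟩]; rfl
    · rw [if_pos rfl, if_neg h2, if_neg (by tauto), List.getElem?_eq_none (by omega)]
  · rw [if_neg h1, if_neg (by tauto)]

theorem len_inner (M : List (List Int)) (i : Nat) :
    ∀ (js : List Nat) (d : List Int), (js.foldl (innerStep M i) d).length = d.length := by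
  intro js
  induction js with
  | nil => intro d; rfl
  | cons j t ih => intro d; simp [List.foldl_cons, ih, innerStep]

theorem len_row (M : List (List Int)) (N : Nat) (d : List Int) (i : Nat) :
    (rowStep M N d i).length = d.length := by
  simp [rowStep, len_inner]

theorem inner_get (M : List (List Int)) (N i : Nat) :
    ∀ (m s : Nat) (d : List Int) (k : Nat), d.length = N → i < s → s + m ≤ N →
    ((List.range' s m).foldl (innerStep M i) d).getD k 0 =
      d.getD k 0 + (if k = i then ∑ j ∈ Finset.Ico s (s + m), ent M i j
                    else if s ≤ k ∧ k < s + m then ent M i k else 0) := by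
  intro m
  induction m with
  | zero =>
    intro s d k hlen hi hsm
    simp only [List.range'_zero, List.foldl_nil, Nat.add_zero, Finset.Ico_self, Finset.sum_empty]
    split_ifs with h1 h2
    · ring
    · omega
    · ring
  | succ m ih =>
    intro s d k hlen hi hsm
    rw [List.range'_succ, List.foldl_cons]
    have hd' : (innerStep M i d s).length = N := by simp [innerStep, hlen]
    rw [ih (s + 1) (innerStep M i d s) k hd' (by omega) (by omega)]
    have hil : i < d.length := by omega
    have hsl : s < d.length := by omega
    have hget : (innerStep M i d s).getD k 0 =
        d.getD k 0 + (if k = i then ent M i s else if k = s then ent M i s else 0) := by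
      simp only [innerStep]
      rw [getD_set]
      simp only [List.length_set]
      by_cases hks : k = s
      · subst hks
        rw [if_pos ⟨rfl, hsl⟩, getD_set, if_neg (by omega), if_neg (by omega), if_pos rfl]
      · rw [if_neg (by omega), getD_set]
        by_cases hki : k = i
        · subst hki
          rw [if_pos ⟨rfl, hil⟩, if_pos rfl]
        · rw [if_neg (by omega), if_neg hki, if_neg hks]
          ring
    rw [hget]
    have hsum : ∑ j ∈ Finset.Ico s (s + (m + 1)), ent M i j =
        ent M i s + ∑ j ∈ Finset.Ico (s + 1) (s + 1 + m), ent M i j := by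
      have h2 : s + (m + 1) = s + 1 + m := by omega
      rw [h2, ← Finset.sum_eq_sum_Ico_succ_bot (by omega : s < s + 1 + m)]
    by_cases hki : k = i
    · subst hki
      rw [if_pos rfl, if_pos rfl, if_pos rfl]
      linear_combination -hsum
    · by_cases hks : k = s
      · rw [if_neg hki, if_pos hks, if_neg hki, if_neg (by omega : ¬(s + 1 ≤ k ∧ k < s + 1 + m)),
            if_neg hki, if_pos (by omega : s ≤ k ∧ k < s + (m + 1)), hks]
        ring
      · rw [if_neg hki, if_neg hks, if_neg hki, if_neg hki]
        by_cases hin : s + 1 ≤ k ∧ k < s + 1 + m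
        · rw [if_pos hin, if_pos (by omega : s ≤ k ∧ k < s + (m + 1))]
          ring
        · rw [if_neg hin, if_neg (by omega : ¬(s ≤ k ∧ k < s + (m + 1)))]
          ring

theorem row_get (M : List (List Int)) (N : Nat) (d : List Int) (i k : Nat)
    (hlen : d.length = N) (hi : i < N) :
    (rowStep M N d i).getD k 0 = d.getD k 0 + contrib M N i k := by
  unfold rowStep
  rw [inner_get M N i (N - (i + 1)) (i + 1) _ k (by simp [hlen]) (by omega) (by omega)]
  rw [getD_set]
  unfold contrib
  have hup : i + 1 + (N - (i + 1)) = N := by omega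
  rw [hup]
  by_cases hki : k = i
  · subst hki
    rw [if_pos ⟨rfl, by omega⟩, if_pos rfl, if_pos rfl]
    ring
  · rw [if_neg (by omega), if_neg hki, if_neg hki]
    by_cases hin : i + 1 ≤ k ∧ k < N
    · rw [if_pos hin, if_pos (by omega : i < k ∧ k < N)]
    · rw [if_neg hin, if_neg (by omega : ¬(i < k ∧ k < N))]

theorem outer_get (M : List (List Int)) (N : Nat) :
    ∀ (m s : Nat) (d : List Int) (k : Nat), d.length = N → s + m ≤ N →
    ((List.range' s m).foldl (rowStep M N) d).getD k 0 =
      d.getD k 0 + ∑ t ∈ Finset.Ico s (s + m), contrib M N t k := by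
  intro m
  induction m with
  | zero =>
    intro s d k hlen hsm
    simp
  | succ m ih =>
    intro s d k hlen hsm
    rw [List.range'_succ, List.foldl_cons,
        ih (s + 1) (rowStep M N d s) k (by rw [len_row, hlen]) (by omega),
        row_get M N d s k hlen (by omega)]
    have hsum : ∑ t ∈ Finset.Ico s (s + (m + 1)), contrib M N t k =
        contrib M N s k + ∑ t ∈ Finset.Ico (s + 1) (s + 1 + m), contrib M N t k := by
      have h2 : s + (m + 1) = s + 1 + m := by omega
      rw [h2]
      exact Finset.sum_eq_sum_Ico_succ_bot (by omega : s < s + 1 + m) _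
    linear_combination -hsum

theorem contrib_total (M : List (List Int)) (N k : Nat) (hk : k < N) :
    ∑ t ∈ Finset.Ico 0 N, contrib M N t k = deg M N k := by
  have h1 : ∑ t ∈ Finset.Ico 0 k, contrib M N t k = ∑ t ∈ Finset.range k, ent M t k := by
    rw [← Finset.range_eq_Ico]
    exact Finset.sum_congr rfl (fun t ht => by
      have := Finset.mem_range.mp ht
      unfold contrib
      rw [if_neg (by omega), if_pos (by omega)])
  have h2 : ∑ t ∈ Finset.Ico (k + 1) N, contrib M N t k = 0 := by
    apply Finset.sum_eq_zero
    intro t ht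
    simp only [Finset.mem_Ico] at ht
    unfold contrib
    rw [if_neg (by omega), if_neg (by omega)]
  have h3 : ∑ t ∈ Finset.Ico 0 N, contrib M N t k =
      ∑ t ∈ Finset.Ico 0 k, contrib M N t k + ∑ t ∈ Finset.Ico k N, contrib M N t k :=
    (Finset.sum_Ico_consecutive _ (by omega) (by omega)).symm
  have h4 : ∑ t ∈ Finset.Ico k N, contrib M N t k =
      contrib M N k k + ∑ t ∈ Finset.Ico (k + 1) N, contrib M N t k :=
    Finset.sum_eq_sum_Ico_succ_bot (by omega) _
  have h5 : contrib M N k k = ent M k k + ∑ j ∈ Finset.Ico (k + 1) N, ent M k j := by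
    unfold contrib; rw [if_pos rfl]
  have h6 : ∑ j ∈ Finset.Ico k N, ent M k j =
      ent M k k + ∑ j ∈ Finset.Ico (k + 1) N, ent M k j :=
    Finset.sum_eq_sum_Ico_succ_bot (by omega) _
  unfold deg
  rw [h3, h1, h4, h5, h2, h6]
  ring

theorem final_eq (M : List (List Int)) (N : Nat) :
    (List.range N).foldl (rowStep M N) (List.replicate N 0) = (List.range N).map (deg M N) := by
  have hlen : ((List.range N).foldl (rowStep M N) (List.replicate N 0)).length = N := by
    rw [List.range_eq_range']
    have : ∀ (l : List Nat) (d : List Int), (l.foldl (rowStep M N) d).length = d.length := by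
      intro l
      induction l with
      | nil => intro d; rfl
      | cons x t ihl => intro d; rw [List.foldl_cons, ihl, len_row]
    rw [this, List.length_replicate]
  apply List.ext_getElem (by simp [hlen])
  intro k h1 h2
  have hkN : k < N := by omega
  have hL : ((List.range N).foldl (rowStep M N) (List.replicate N 0)).getD k 0 =
      deg M N k := by
    rw [List.range_eq_range', outer_get M N N 0 _ k (by simp) (by omega)]
    rw [List.getD_eq_getElem?_getD, List.getElem?_replicate, if_pos hkN]
    simp only [Option.getD_some, zero_add]
    exact contrib_total M N k hkN
  rw [← List.getD_eq_getElem _ 0 h1, hL]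
  simp

theorem alt_loop_eq (M : List (List Int)) (n : Int) :
    (PySem.List.pyRange 0 n 1).foldl (fun d i =>
      let d := PySem.List.pySetD d i (PySem.List.pyGetD d i 0 + PySem.List.pyGetD (PySem.List.pyGetD M i []) i 0)
      (PySem.List.pyRange (i + 1) n 1).foldl (fun d j =>
        let v := PySem.List.pyGetD (PySem.List.pyGetD M i []) j 0
        let d := PySem.List.pySetD d i (PySem.List.pyGetD d i 0 + v)
        PySem.List.pySetD d j (PySem.List.pyGetD d j 0 + v)) d) (List.replicate n.toNat 0)
    = (List.range n.toNat).foldl (rowStep M n.toNat) (List.replicate n.toNat 0) := by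
  rw [PySem.List.pyRange_one 0 n]
  simp only [sub_zero, List.foldl_map, zero_add]
  apply PySem.List.foldl_congr_mem
  intro d k hk
  simp only [List.mem_range] at hk
  have hn : n = (n.toNat : Int) := by omega
  simp only [PySem.List.pySetD_natCast, PySem.List.pyGetD_natCast]
  rw [hn, PySem.List.pyRange_one ((k : Int) + 1) (n.toNat : Int)]
  have hm : (((n.toNat : Int)) - ((k : Int) + 1)).toNat = n.toNat - (k + 1) := by omega
  rw [hm]
  simp only [List.foldl_map]
  unfold rowStep
  rw [List.range'_eq_map_range, List.foldl_map]
  apply PySem.List.foldl_congr_mem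
  intro d' t _
  have hc : ((k : Int) + 1 + (t : Int)) = (((k + 1 + t : Nat)) : Int) := by push_cast; ring
  rw [hc]
  simp only [PySem.List.pySetD_natCast, PySem.List.pyGetD_natCast]
  rfl

theorem b_eq (M : List (List Int)) (n : Int) :
    max_degree_alt M n = (List.range n.toNat).foldl (fun mx i => max mx (deg M n.toNat i)) 0 := by
  unfold max_degree_alt
  dsimp only
  rw [alt_loop_eq, final_eq, List.foldl_map]

-- ===== VERDICT (by name: the statement is the Claim_ definition above) =====
theorem max_degree_spec : Claim_equal_max_degree := by
  intro M n _ _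
  unfold Spec_max_degree
  rw [a_eq, b_eq]
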